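-- pv_equiv track=rewrite | github.com/juniorm4ciel/Binary-Bots | robozera_powerboss.py | check_tiebreaker
-- ===== SOURCE A (Python) =====
-- def check_tiebreaker(candles):
--     c = lambda i: candles[i]['close']
--     o = lambda i: candles[i]['open']
--     # Os principais padrões do script, pode expandir conforme necessário
--     # Os índices: candles[0] é a mais antiga, candles[5] é a mais recente
--     padroes = [
--         # Exemplo: 3 altas, 3 baixas
--         (lambda: c(0)>o(0) and c(1)>o(1) and c(2)>o(2) and c(3)<o(3) and c(4)<o(4) and c(5)<o(5), -1),
--         (lambda: c(0)>o(0) and c(1)>o(1) and c(2)<o(2) and c(3)>o(3) and c(4)<o(4) and c(5)<o(5), -1),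
--         (lambda: c(0)>o(0) and c(1)>o(1) and c(2)<o(2) and c(3)<o(3) and c(4)>o(4) and c(5)<o(5), -1),
--         (lambda: c(0)>o(0) and c(1)>o(1) and c(2)<o(2) and c(3)<o(3) and c(4)<o(4) and c(5)>o(5), 1),
--         (lambda: c(0)>o(0) and c(1)<o(1) and c(2)>o(2) and c(3)>o(3) and c(4)<o(4) and c(5)<o(5), -1),
--         (lambda: c(0)>o(0) and c(1)<o(1) and c(2)>o(2) and c(3)<o(3) and c(4)>o(4) and c(5)<o(5), -1),
--         (lambda: c(0)>o(0) and c(1)<o(1) and c(2)>o(2) and c(3)<o(3) and c(4)<o(4) and c(5)>o(5), 1),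
--         (lambda: c(0)>o(0) and c(1)<o(1) and c(2)<o(2) and c(3)>o(3) and c(4)>o(4) and c(5)<o(5), -1),
--         (lambda: c(0)>o(0) and c(1)<o(1) and c(2)<o(2) and c(3)>o(3) and c(4)<o(4) and c(5)>o(5), 1),
--         (lambda: c(0)>o(0) and c(1)<o(1) and c(2)<o(2) and c(3)<o(3) and c(4)>o(4) and c(5)>o(5), 1)
--         # ... e assim por diante, conforme script
--     ]
--     for cond, direcao in padroes:
--         try:
--             if cond():
--                 return direcao
--         except Exception:
--             continue
--     return 0
-- ===== SOURCE B (Python) =====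
-- _TIEBREAK_TABLE = {
--     (1, 1, 1, -1, -1, -1): -1,
--     (1, 1, -1, 1, -1, -1): -1,
--     (1, 1, -1, -1, 1, -1): -1,
--     (1, 1, -1, -1, -1, 1): 1,
--     (1, -1, 1, 1, -1, -1): -1,
--     (1, -1, 1, -1, 1, -1): -1,
--     (1, -1, 1, -1, -1, 1): 1,
--     (1, -1, -1, 1, 1, -1): -1,
--     (1, -1, -1, 1, -1, 1): 1,
--     (1, -1, -1, -1, 1, 1): 1,
-- }
--
-- def check_tiebreaker(candles):
--     try:
--         sig = tuple(
--             (candles[i]['close'] > candles[i]['open'])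
--             - (candles[i]['close'] < candles[i]['open'])
--             for i in range(6)
--         )
--     except Exception:
--         return 0
--     return _TIEBREAK_TABLE.get(sig, 0)
-- ===== Notes on version B (the rewrite author's own statement) =====
-- stated objective: simpler
-- what changed: B replaces the list of ten short-circuiting lambda conditions with one pass that builds a 6-candle sign signature (1/0/-1, any access error giving 0) and a single lookup in a precomputed pattern table.
import Mathlib
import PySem

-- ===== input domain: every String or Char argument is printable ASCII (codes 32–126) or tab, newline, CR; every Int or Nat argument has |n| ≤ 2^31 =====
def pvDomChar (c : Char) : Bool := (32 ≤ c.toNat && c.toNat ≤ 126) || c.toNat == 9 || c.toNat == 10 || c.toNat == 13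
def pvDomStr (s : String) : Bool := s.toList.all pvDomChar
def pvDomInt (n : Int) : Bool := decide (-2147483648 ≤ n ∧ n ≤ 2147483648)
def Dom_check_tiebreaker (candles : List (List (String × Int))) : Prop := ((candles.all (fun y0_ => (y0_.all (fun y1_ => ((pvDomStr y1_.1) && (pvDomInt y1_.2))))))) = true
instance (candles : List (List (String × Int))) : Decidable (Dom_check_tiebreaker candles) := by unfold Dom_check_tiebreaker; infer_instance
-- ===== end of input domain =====

-- B replaces ten short-circuiting pattern conditions by one sign-signature build plus a single table lookup (objective: simpler).

-- ===== PORT A =====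
-- candles[i][key]: IndexError/KeyError modelled as none (A catches every Exception)
def pvGetA (candles : List (List (String × Int))) (i : Int) (k : String) : Option Int :=
  (PySem.List.pyGet? candles i).bind (fun d => PySem.Dict.get? (PySem.Dict.mk d) k)

-- one lambda condition: conjuncts in order, short-circuit on False, none = exception
def pvCond (candles : List (List (String × Int))) : List (Bool × Int) → Option Bool
  | [] => some true
  | (f, i) :: rest =>
    match pvGetA candles i "close", pvGetA candles i "open" with
    | some cv, some ov =>
        if (if f then cv > ov else cv < ov) then pvCond candles rest else some false
    | _, _ => none

-- the `padroes` list: (comparison flags for indices 0..5; true = '>'), direction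
def pvPadroes : List (List (Bool × Int) × Int) :=
  [ ([(true,0),(true,1),(true,2),(false,3),(false,4),(false,5)], -1)
  , ([(true,0),(true,1),(false,2),(true,3),(false,4),(false,5)], -1)
  , ([(true,0),(true,1),(false,2),(false,3),(true,4),(false,5)], -1)
  , ([(true,0),(true,1),(false,2),(false,3),(false,4),(true,5)], 1)
  , ([(true,0),(false,1),(true,2),(true,3),(false,4),(false,5)], -1)
  , ([(true,0),(false,1),(true,2),(false,3),(true,4),(false,5)], -1)
  , ([(true,0),(false,1),(true,2),(false,3),(false,4),(true,5)], 1)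
  , ([(true,0),(false,1),(false,2),(true,3),(true,4),(false,5)], -1)
  , ([(true,0),(false,1),(false,2),(true,3),(false,4),(true,5)], 1)
  , ([(true,0),(false,1),(false,2),(false,3),(true,4),(true,5)], 1) ]

def pvLoopA (candles : List (List (String × Int))) : List (List (Bool × Int) × Int) → Int
  | [] => 0
  | (cond, direcao) :: rest =>
    match pvCond candles cond with
    | some true => direcao
    | _ => pvLoopA candles rest

def check_tiebreaker (candles : List (List (String × Int))) : Int :=
  pvLoopA candles pvPadroes

-- ===== PORT B =====
def pvSigB (candles : List (List (String × Int))) (i : Int) : Option Int :=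
  match pvGetA candles i "close", pvGetA candles i "open" with
  | some cv, some ov =>
      some ((if cv > ov then 1 else 0) - (if cv < ov then 1 else 0))
  | _, _ => none

-- the tuple(...) generator over range(6): first exception aborts
def pvBuildSig (candles : List (List (String × Int))) : List Int → Option (List Int)
  | [] => some []
  | i :: rest =>
    match pvSigB candles i with
    | none => none
    | some s => (pvBuildSig candles rest).map (s :: ·)

def pvTable : PySem.Dict (List Int) Int :=
  PySem.Dict.ofList
    [ ([1, 1, 1, -1, -1, -1], -1)
    , ([1, 1, -1, 1, -1, -1], -1)
    , ([1, 1, -1, -1, 1, -1], -1)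
    , ([1, 1, -1, -1, -1, 1], 1)
    , ([1, -1, 1, 1, -1, -1], -1)
    , ([1, -1, 1, -1, 1, -1], -1)
    , ([1, -1, 1, -1, -1, 1], 1)
    , ([1, -1, -1, 1, 1, -1], -1)
    , ([1, -1, -1, 1, -1, 1], 1)
    , ([1, -1, -1, -1, 1, 1], 1) ]

def check_tiebreaker_alt (candles : List (List (String × Int))) : Int :=
  match pvBuildSig candles [0, 1, 2, 3, 4, 5] with
  | none => 0
  | some sig => PySem.Dict.getD pvTable sig 0

-- ===== PRECONDITION & SPEC =====
def Spec_check_tiebreaker (candles : List (List (String × Int))) (out : Int) : Prop := out = check_tiebreaker_alt candles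
instance (candles : List (List (String × Int))) (out : Int) : Decidable (Spec_check_tiebreaker candles out) := by unfold Spec_check_tiebreaker; infer_instance

-- ===== CLAIM (what is proved, stated in full; the proofs are below) =====
def Claim_equal_check_tiebreaker : Prop := ∀ (candles : List (List (String × Int))), Dom_check_tiebreaker candles → Spec_check_tiebreaker candles (check_tiebreaker candles)

-- ===== LEMMAS AND PROOFS =====

-- encode each candle's observable state: none = access error, some 0 = down, some 1 = flat, some 2 = up
def pvEnc (candles : List (List (String × Int))) (i : Int) : Option (Fin 3) :=
  match pvGetA candles i "close", pvGetA candles i "open" with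
  | some cv, some ov => some (if cv > ov then 2 else if cv < ov then 0 else 1)
  | _, _ => none

def pvDecSig : Option (Fin 3) → Option Int
  | none => none
  | some k => some ((k : Int) - 1)

-- abstract versions of both programs over the 6 encodings
def pvCondE : List (Bool × Option (Fin 3)) → Option Bool
  | [] => some true
  | (_, none) :: _ => none
  | (f, some s) :: rest =>
    if (if f then s = 2 else s = 0) then pvCondE rest else some false

def pvLoopE (es : Int → Option (Fin 3)) : List (List (Bool × Int) × Int) → Int
  | [] => 0
  | (cond, direcao) :: rest =>
    match pvCondE (cond.map (fun fi => (fi.1, es fi.2))) with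
    | some true => direcao
    | _ => pvLoopE es rest

def pvBuildSigE (es : Int → Option (Fin 3)) : List Int → Option (List Int)
  | [] => some []
  | i :: rest =>
    match pvDecSig (es i) with
    | none => none
    | some s => (pvBuildSigE es rest).map (s :: ·)

def pvAFun (a b c d e f : Option (Fin 3)) : Int :=
  pvLoopE (fun i => if i = 0 then a else if i = 1 then b else if i = 2 then c
                    else if i = 3 then d else if i = 4 then e else f) pvPadroes

def pvBFun (a b c d e f : Option (Fin 3)) : Int :=
  match pvBuildSigE (fun i => if i = 0 then a else if i = 1 then b else if i = 2 then c
                    else if i = 3 then d else if i = 4 then e else f) [0, 1, 2, 3, 4, 5] with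
  | none => 0
  | some sig => PySem.Dict.getD pvTable sig 0

theorem pvSigB_eq (candles : List (List (String × Int))) (i : Int) :
    pvSigB candles i = pvDecSig (pvEnc candles i) := by
  unfold pvSigB pvEnc pvDecSig
  rcases h1 : pvGetA candles i "close" with _ | cv <;>
    rcases h2 : pvGetA candles i "open" with _ | ov <;> simp
  rcases lt_trichotomy cv ov with h | h | h <;>
    simp [h, not_lt_of_gt]

theorem pvCond_eq (candles : List (List (String × Int))) (l : List (Bool × Int)) :
    pvCond candles l = pvCondE (l.map (fun fi => (fi.1, pvEnc candles fi.2))) := by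
  induction l with
  | nil => rfl
  | cons fi rest ih =>
    obtain ⟨f, i⟩ := fi
    simp only [List.map, pvCond, pvEnc]
    rcases h1 : pvGetA candles i "close" with _ | cv <;>
      rcases h2 : pvGetA candles i "open" with _ | ov <;> simp [pvCondE]
    rcases lt_trichotomy cv ov with h | h | h <;>
      cases f <;>
      simp [h, not_lt_of_gt, ih] <;> rfl

theorem pvABFun_eq2 : ∀ b c d e f : Option (Fin 3),
    pvAFun (some 2) b c d e f = pvBFun (some 2) b c d e f := by decide

theorem pvABFun_eq : ∀ a b c d e f : Option (Fin 3),
    pvAFun a b c d e f = pvBFun a b c d e f := by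
  intro a b c d e f
  match a with
  | none => rfl
  | some k =>
    fin_cases k
    · -- candle 0 down: A's first conjunct is false in every pattern; B's key head is -1, no table key matches
      show (0 : Int) = pvBFun (some 0) b c d e f
      unfold pvBFun
      rw [show pvBuildSigE (fun i => if i = 0 then (some 0 : Option (Fin 3)) else if i = 1 then b
            else if i = 2 then c else if i = 3 then d else if i = 4 then e else f) [0, 1, 2, 3, 4, 5]
          = (pvBuildSigE (fun i => if i = 0 then (some 0 : Option (Fin 3)) else if i = 1 then b
            else if i = 2 then c else if i = 3 then d else if i = 4 then e else f) [1, 2, 3, 4, 5]).map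
              (fun x => (-1 : Int) :: x) from rfl]
      cases h : pvBuildSigE (fun i => if i = 0 then (some 0 : Option (Fin 3)) else if i = 1 then b
            else if i = 2 then c else if i = 3 then d else if i = 4 then e else f) [1, 2, 3, 4, 5] <;> rfl
    · -- candle 0 flat: same shape, B's key head is 0
      show (0 : Int) = pvBFun (some 1) b c d e f
      unfold pvBFun
      rw [show pvBuildSigE (fun i => if i = 0 then (some 1 : Option (Fin 3)) else if i = 1 then b
            else if i = 2 then c else if i = 3 then d else if i = 4 then e else f) [0, 1, 2, 3, 4, 5]
          = (pvBuildSigE (fun i => if i = 0 then (some 1 : Option (Fin 3)) else if i = 1 then b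
            else if i = 2 then c else if i = 3 then d else if i = 4 then e else f) [1, 2, 3, 4, 5]).map
              (fun x => (0 : Int) :: x) from rfl]
      cases h : pvBuildSigE (fun i => if i = 0 then (some 1 : Option (Fin 3)) else if i = 1 then b
            else if i = 2 then c else if i = 3 then d else if i = 4 then e else f) [1, 2, 3, 4, 5] <;> rfl
    · exact pvABFun_eq2 b c d e f

theorem check_tiebreaker_eq (candles : List (List (String × Int))) :
    check_tiebreaker candles = check_tiebreaker_alt candles := by
  have hA : check_tiebreaker candles
      = pvAFun (pvEnc candles 0) (pvEnc candles 1) (pvEnc candles 2)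
               (pvEnc candles 3) (pvEnc candles 4) (pvEnc candles 5) := by
    unfold check_tiebreaker pvAFun
    simp only [pvPadroes, pvLoopA, pvLoopE, pvCond_eq, List.map]
    norm_num
  have hB : check_tiebreaker_alt candles
      = pvBFun (pvEnc candles 0) (pvEnc candles 1) (pvEnc candles 2)
               (pvEnc candles 3) (pvEnc candles 4) (pvEnc candles 5) := by
    unfold check_tiebreaker_alt pvBFun
    simp only [pvBuildSig, pvBuildSigE, pvSigB_eq]
    norm_num
  rw [hA, hB, pvABFun_eq]

-- ===== VERDICT (by name: the statement is the Claim_ definition above) =====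
theorem check_tiebreaker_spec : Claim_equal_check_tiebreaker := by
  intro candles _
  unfold Spec_check_tiebreaker
  exact check_tiebreaker_eq candles
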